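-- pv_equiv track=rewrite | github.com/kai-linux/agent-os | orchestrator/queue.py | _first_concrete_blocker
-- ===== SOURCE A (Python) =====
-- def _first_concrete_blocker(blockers: list[str]) -> str:
--     """Return the most informative single-line blocker (for a TG one-liner)."""
--     for raw in blockers or []:
--         line = str(raw).strip()
--         if not line or line.lower() in ("- none", "none"):
--             continue
--         # Prefer the stdout/stderr tail when present — that's where rate-limit
--         # messages and real errors surface.
--         if "stdout tail:" in line.lower() or "stderr tail:" in line.lower():
--             return line.lstrip("- ").strip()
--         # Otherwise take the first real blocker but remember it in case a tail
--         # shows up later in the list.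
--         first = line.lstrip("- ").strip()
--         for more in blockers[blockers.index(raw) + 1:]:
--             if "tail:" in str(more).lower():
--                 return str(more).lstrip("- ").strip()
--         return first
--     return ""
-- ===== SOURCE B (Python) =====
-- def _first_concrete_blocker(blockers: list[str]) -> str:
--     """Single linear pass with an accumulator instead of a nested remainder scan."""
--     first = None
--     for raw in blockers or []:
--         if first is not None:
--             # A later line: any generic "tail:" wins over the remembered blocker.
--             if "tail:" in str(raw).lower():
--                 return str(raw).lstrip("- ").strip()
--             continue
--         line = str(raw).strip()
--         if not line or line.lower() in ("- none", "none"):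
--             continue
--         clean = line.lstrip("- ").strip()
--         if "stdout tail:" in line.lower() or "stderr tail:" in line.lower():
--             return clean
--         first = clean
--     return first if first is not None else ""
-- ===== Notes on version B (the rewrite author's own statement) =====
-- stated objective: simpler
-- what changed: Replaced A's nested remainder scan (blockers.index(raw) plus a slice re-scanned inside the outer loop) by a single linear pass that remembers the first valid blocker in an accumulator and returns on the first later 'tail:' line.
import Mathlib
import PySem

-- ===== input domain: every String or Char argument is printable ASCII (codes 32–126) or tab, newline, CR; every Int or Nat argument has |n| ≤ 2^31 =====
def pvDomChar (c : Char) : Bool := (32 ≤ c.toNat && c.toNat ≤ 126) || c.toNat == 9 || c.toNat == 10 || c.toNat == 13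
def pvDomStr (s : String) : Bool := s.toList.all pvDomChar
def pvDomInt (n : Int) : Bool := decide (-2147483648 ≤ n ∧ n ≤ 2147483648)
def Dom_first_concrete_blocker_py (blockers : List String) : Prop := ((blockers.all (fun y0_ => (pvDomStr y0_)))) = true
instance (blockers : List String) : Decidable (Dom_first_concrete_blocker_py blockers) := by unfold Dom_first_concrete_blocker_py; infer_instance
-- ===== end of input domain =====

-- ===== PORT A =====
-- B differs from A by one linear pass with a remembered first blocker instead of A's nested remainder scan via blockers.index; same return value (objective: simpler).

-- s.lstrip("- ").strip()  — lstrip with a char set is ported by hand as dropWhile over the set {'-', ' '} (exact for this literal set)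
def pvClean (s : String) : String :=
  PySem.Str.strip (String.ofList (s.toList.dropWhile (fun c => c == '-' || c == ' ')))

-- A's inner loop: "for more in tailpart: if 'tail:' in str(more).lower(): return str(more).lstrip('- ').strip()"
def aScanTail : List String → Option String
  | [] => none
  | more :: rest =>
      if PySem.Str.isIn "tail:" (PySem.Str.lower more) then some (pvClean more)
      else aScanTail rest

def aLoop (blockers : List String) : List String → String
  | [] => ""
  | raw :: rest =>
      let line := PySem.Str.strip raw
      if line == "" || PySem.Str.lower line == "- none" || PySem.Str.lower line == "none" then
        aLoop blockers rest
      else if PySem.Str.isIn "stdout tail:" (PySem.Str.lower line)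
           || PySem.Str.isIn "stderr tail:" (PySem.Str.lower line) then
        pvClean line
      else
        let first := pvClean line
        -- blockers.index(raw): raw is an element of blockers whenever aLoop is reached from the
        -- top-level call, so the .getD 0 default is never taken (Python would raise only if absent)
        let idx := (PySem.List.index? blockers raw).getD 0
        match aScanTail (PySem.List.slice blockers (some ((idx : Int) + 1)) none) with
        | some v => v
        | none => first

def first_concrete_blocker_py (blockers : List String) : String :=
  aLoop blockers blockers

-- ===== PORT B =====
def bLoop : Option String → List String → String
  | some f, [] => f
  | none, [] => ""
  | some f, raw :: rest =>
      if PySem.Str.isIn "tail:" (PySem.Str.lower raw) then pvClean raw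
      else bLoop (some f) rest
  | none, raw :: rest =>
      let line := PySem.Str.strip raw
      if line == "" || PySem.Str.lower line == "- none" || PySem.Str.lower line == "none" then
        bLoop none rest
      else
        let clean := pvClean line
        if PySem.Str.isIn "stdout tail:" (PySem.Str.lower line)
           || PySem.Str.isIn "stderr tail:" (PySem.Str.lower line) then clean
        else bLoop (some clean) rest

def first_concrete_blocker_py_alt (blockers : List String) : String :=
  bLoop none blockers

-- ===== PRECONDITION & SPEC =====
def Spec_first_concrete_blocker_py (blockers : List String) (out : String) : Prop := out = first_concrete_blocker_py_alt blockers
instance (blockers : List String) (out : String) : Decidable (Spec_first_concrete_blocker_py blockers out) := by unfold Spec_first_concrete_blocker_py; infer_instance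

-- ===== CLAIM (what is proved, stated in full; the proofs are below) =====
def Claim_equal_first_concrete_blocker_py : Prop := ∀ (blockers : List String), Dom_first_concrete_blocker_py blockers → Spec_first_concrete_blocker_py blockers (first_concrete_blocker_py blockers)

-- ===== LEMMAS AND PROOFS =====
-- the skip condition of both loops, as a predicate on the raw element
def pvSkips (raw : String) : Bool :=
  let line := PySem.Str.strip raw
  line == "" || PySem.Str.lower line == "- none" || PySem.Str.lower line == "none"

-- B with a stored first blocker = A's remainder scan with that fallback
theorem bLoop_some (f : String) (rest : List String) :
    bLoop (some f) rest = (aScanTail rest).getD f := by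
  induction rest with
  | nil => rfl
  | cons more rest ih =>
      simp only [bLoop, aScanTail]
      split_ifs with h <;> simp [ih]

theorem not_mem_of_all_skips {pre : List String} {raw : String}
    (hpre : ∀ x ∈ pre, pvSkips x = true) (hraw : pvSkips raw = false) : raw ∉ pre := by
  intro hmem
  have := hpre raw hmem
  simp [this] at hraw

-- the main invariant: while every processed element was skipped, A's loop over the
-- remaining suffix agrees with B's first?-=-none loop over the same suffix
theorem loop_agree (pre rest : List String)
    (hpre : ∀ x ∈ pre, pvSkips x = true) :
    aLoop (pre ++ rest) rest = bLoop none rest := by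
  induction rest generalizing pre with
  | nil => rfl
  | cons raw rest ih =>
      simp only [aLoop, bLoop]
      by_cases hskip : (PySem.Str.strip raw == "" || PySem.Str.lower (PySem.Str.strip raw) == "- none" || PySem.Str.lower (PySem.Str.strip raw) == "none") = true
      · simp only [hskip, if_pos]
        have := ih (pre ++ [raw]) (by
          intro x hx
          rcases List.mem_append.mp hx with h | h
          · exact hpre x h
          · simp only [List.mem_singleton] at h; subst h; exact hskip)
        simpa using this
      · rw [if_neg hskip, if_neg hskip]
        by_cases htail : (PySem.Str.isIn "stdout tail:" (PySem.Str.lower (PySem.Str.strip raw))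
           || PySem.Str.isIn "stderr tail:" (PySem.Str.lower (PySem.Str.strip raw))) = true
        · rw [if_pos htail, if_pos htail]
        · rw [if_neg htail, if_neg htail]
          have hnm : raw ∉ pre := not_mem_of_all_skips hpre (by simp [pvSkips, hskip])
          have hidx : PySem.List.index? (pre ++ raw :: rest) raw = some pre.length := by
            rw [PySem.List.index?_eq_some_iff]
            exact ⟨pre, rest, rfl, rfl, hnm⟩
          rw [hidx]
          have hslice : PySem.List.slice (pre ++ raw :: rest) (some ((pre.length : Int) + 1)) none
              = rest := by
            have : ((pre.length : Int) + 1) = ((pre.length + 1 : Nat) : Int) := by push_cast; ring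
            rw [this, PySem.List.slice_from_natCast,
              show pre.length + 1 = (pre ++ [raw]).length by simp,
              show pre ++ raw :: rest = (pre ++ [raw]) ++ rest by simp]
            exact List.drop_left
          simp only [Option.getD_some, hslice]
          rw [bLoop_some]
          cases aScanTail rest <;> simp

-- ===== VERDICT (by name: the statement is the Claim_ definition above) =====
theorem first_concrete_blocker_py_spec : Claim_equal_first_concrete_blocker_py := by
  intro blockers _
  unfold Spec_first_concrete_blocker_py first_concrete_blocker_py first_concrete_blocker_py_alt
  simpa using loop_agree [] blockers (by simp)
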